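-- pv_equiv track=rewrite | github.com/snoo53/Aim-Materials | qe_campaign_v1_local/prepare_relax_retry_input.py | parse_last_cell_parameters
-- ===== SOURCE A (Python) =====
-- from typing import List, Optional, Tuple
--
-- def parse_last_cell_parameters(lines: List[str]) -> Tuple[Optional[str], Optional[List[str]]]:
--     last_header = None
--     last_block = None
--     for i, line in enumerate(lines):
--         if not line.strip().startswith("CELL_PARAMETERS"):
--             continue
--         header = line.rstrip("\n")
--         block: List[str] = []
--         j = i + 1
--         while j < len(lines):
--             s = lines[j].strip()
--             if not s:
--                 if block:
--                     break
--                 j += 1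
--                 continue
--             if s.startswith("ATOMIC_POSITIONS") or s.startswith("K_POINTS"):
--                 break
--             if s.startswith("&") or s.startswith("/"):
--                 break
--             parts = s.split()
--             if len(parts) < 3:
--                 break
--             block.append(lines[j].rstrip("\n"))
--             j += 1
--             if len(block) >= 3:
--                 break
--         if len(block) == 3:
--             last_header = header
--             last_block = block
--     return last_header, last_block
-- ===== SOURCE B (Python) =====
-- from typing import List, Optional, Tuple
--
-- def parse_last_cell_parameters(lines: List[str]) -> Tuple[Optional[str], Optional[List[str]]]:
--     def is_row(line: str) -> bool:
--         s = line.strip()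
--         return bool(s) and not s.startswith(("ATOMIC_POSITIONS", "K_POINTS", "&", "/")) and len(s.split()) >= 3
--
--     n = len(lines)
--     for i in range(n - 1, -1, -1):
--         if not lines[i].strip().startswith("CELL_PARAMETERS"):
--             continue
--         k = i + 1
--         while k < n and not lines[k].strip():
--             k += 1
--         if k + 3 <= n and all(is_row(lines[j]) for j in range(k, k + 3)):
--             return lines[i].rstrip("\n"), [lines[j].rstrip("\n") for j in range(k, k + 3)]
--     return None, None
-- ===== Notes on version B (the rewrite author's own statement) =====
-- stated objective: simpler
-- what changed: B scans header lines from the end with an early return and replaces A's stateful inner while-loop (accumulator block, break/continue logic) by a closed-form check of the 3-line window after skipping blanks; A's last_header/last_block accumulators disappear.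
import Mathlib
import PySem

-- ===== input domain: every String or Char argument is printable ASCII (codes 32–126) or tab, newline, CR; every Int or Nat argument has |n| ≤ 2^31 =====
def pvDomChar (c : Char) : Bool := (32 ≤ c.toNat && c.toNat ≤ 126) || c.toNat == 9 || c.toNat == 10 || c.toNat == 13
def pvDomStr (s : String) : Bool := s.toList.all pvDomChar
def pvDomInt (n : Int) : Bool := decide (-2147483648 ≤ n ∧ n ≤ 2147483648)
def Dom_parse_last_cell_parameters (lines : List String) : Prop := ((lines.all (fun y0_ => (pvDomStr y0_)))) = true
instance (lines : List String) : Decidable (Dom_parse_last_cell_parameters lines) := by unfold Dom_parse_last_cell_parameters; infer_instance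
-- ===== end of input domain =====

-- B replaces A's forward keep-the-last accumulator loop and stateful inner row scan by a
-- reverse scan over header indices with an early return and a closed-form 3-line window check
-- (objective: simpler decomposition; same asymptotic cost).

-- shared primitive: exact port of Python's line.rstrip("\n") (drop trailing newline code points)
def pyRstripNl (s : String) : String :=
  String.ofList ((s.toList.reverse.dropWhile (fun c => c == '\n')).reverse)

-- ===== PORT A =====
-- inner 'while j < len(lines)' loop of A, state = (j, block)
def pvScanA (lines : List String) (j : Nat) (block : List String) : List String :=
  if h : j < lines.length then
    let s := PySem.Str.strip (lines.getD j "")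
    if s = "" then
      if block ≠ [] then block else pvScanA lines (j + 1) block
    else if PySem.Str.startswith s "ATOMIC_POSITIONS" || PySem.Str.startswith s "K_POINTS" then block
    else if PySem.Str.startswith s "&" || PySem.Str.startswith s "/" then block
    else if (PySem.Str.split₀ s).length < 3 then block
    else
      let block' := block ++ [pyRstripNl (lines.getD j "")]
      if 3 ≤ block'.length then block' else pvScanA lines (j + 1) block'
  else block
termination_by lines.length - j

def parse_last_cell_parameters (lines : List String) : Option String × Option (List String) :=
  (PySem.List.enumerate lines 0).foldl
    (fun (acc : Option String × Option (List String)) p =>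
      if !(PySem.Str.startswith (PySem.Str.strip p.2) "CELL_PARAMETERS") then acc
      else
        let header := pyRstripNl p.2
        let block := pvScanA lines (p.1.toNat + 1) []
        if block.length = 3 then (some header, some block) else acc)
    (none, none)

-- ===== PORT B =====
-- Source B's is_row
def pvIsRow (line : String) : Bool :=
  (PySem.Str.strip line != "") &&
    !(PySem.Str.startswith (PySem.Str.strip line) "ATOMIC_POSITIONS" ||
      PySem.Str.startswith (PySem.Str.strip line) "K_POINTS" ||
      PySem.Str.startswith (PySem.Str.strip line) "&" ||
      PySem.Str.startswith (PySem.Str.strip line) "/") &&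
    (3 ≤ (PySem.Str.split₀ (PySem.Str.strip line)).length)

-- Source B's 'while k < n and not lines[k].strip(): k += 1'
def pvSkipBlank (lines : List String) (k : Nat) : Nat :=
  if h : k < lines.length then
    if PySem.Str.strip (lines.getD k "") = "" then pvSkipBlank lines (k + 1) else k
  else k
termination_by lines.length - k

-- Source B's 'for i in range(n-1, -1, -1)' with early return; argument is i+1
def pvFindB (lines : List String) : Nat → Option String × Option (List String)
  | 0 => (none, none)
  | i + 1 =>
    if PySem.Str.startswith (PySem.Str.strip (lines.getD i "")) "CELL_PARAMETERS" then
      let k := pvSkipBlank lines (i + 1)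
      if k + 3 ≤ lines.length && (List.range' k 3).all (fun j => pvIsRow (lines.getD j "")) then
        (some (pyRstripNl (lines.getD i "")),
         some ((List.range' k 3).map (fun j => pyRstripNl (lines.getD j ""))))
      else pvFindB lines i
    else pvFindB lines i

def parse_last_cell_parameters_alt (lines : List String) : Option String × Option (List String) :=
  pvFindB lines lines.length

-- ===== PRECONDITION & SPEC =====
def Spec_parse_last_cell_parameters (lines : List String) (out : Option String × Option (List String)) : Prop := out = parse_last_cell_parameters_alt lines
instance (lines : List String) (out : Option String × Option (List String)) : Decidable (Spec_parse_last_cell_parameters lines out) := by unfold Spec_parse_last_cell_parameters; infer_instance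

-- ===== CLAIM (what is proved, stated in full; the proofs are below) =====
def Claim_equal_parse_last_cell_parameters : Prop := ∀ (lines : List String), Dom_parse_last_cell_parameters lines → Spec_parse_last_cell_parameters lines (parse_last_cell_parameters lines)

-- ===== LEMMAS AND PROOFS =====

set_option maxHeartbeats 1000000

-- out-of-range lines are never rows
lemma pvIsRow_of_ge (lines : List String) (m : Nat) (hm : ¬ m < lines.length) :
    pvIsRow (lines.getD m "") = false := by
  rw [List.getD_eq_getElem?_getD, List.getElem?_eq_none (by omega)]
  decide

lemma pvIsRow_lt (lines : List String) (m : Nat) (h : pvIsRow (lines.getD m "") = true) :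
    m < lines.length := by
  by_contra hm
  rw [pvIsRow_of_ge lines m hm] at h
  simp at h

lemma pvIsRow_elim (line : String) (h : pvIsRow line = true) :
    PySem.Str.strip line ≠ "" ∧
    PySem.Str.startswith (PySem.Str.strip line) "ATOMIC_POSITIONS" = false ∧
    PySem.Str.startswith (PySem.Str.strip line) "K_POINTS" = false ∧
    PySem.Str.startswith (PySem.Str.strip line) "&" = false ∧
    PySem.Str.startswith (PySem.Str.strip line) "/" = false ∧
    3 ≤ (PySem.Str.split₀ (PySem.Str.strip line)).length := by
  unfold pvIsRow at h
  simp only [Bool.and_eq_true] at h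
  obtain ⟨⟨ha, hb⟩, hc⟩ := h
  rw [Bool.not_eq_true', Bool.or_eq_false_iff, Bool.or_eq_false_iff, Bool.or_eq_false_iff] at hb
  exact ⟨bne_iff_ne.mp ha, hb.1.1.1, hb.1.1.2, hb.1.2, hb.2, of_decide_eq_true hc⟩

lemma pvIsRow_intro (line : String)
    (hs : PySem.Str.strip line ≠ "")
    (h1 : PySem.Str.startswith (PySem.Str.strip line) "ATOMIC_POSITIONS" = false)
    (h2 : PySem.Str.startswith (PySem.Str.strip line) "K_POINTS" = false)
    (h3 : PySem.Str.startswith (PySem.Str.strip line) "&" = false)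
    (h4 : PySem.Str.startswith (PySem.Str.strip line) "/" = false)
    (h5 : 3 ≤ (PySem.Str.split₀ (PySem.Str.strip line)).length) :
    pvIsRow line = true := by
  unfold pvIsRow
  rw [h1, h2, h3, h4]
  simp only [Bool.or_self, Bool.not_false, Bool.and_true,
    Bool.and_eq_true, bne_iff_ne, ne_eq, decide_eq_true_eq]
  exact ⟨hs, h5⟩

-- skipBlank: lower bound, and the line it lands on is non-blank when in range
lemma pvSkipBlank_spec (lines : List String) (j : Nat) :
    j ≤ pvSkipBlank lines j ∧
      (pvSkipBlank lines j < lines.length →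
        PySem.Str.strip (lines.getD (pvSkipBlank lines j) "") ≠ "") := by
  by_cases h : j < lines.length
  · by_cases hb : PySem.Str.strip (lines.getD j "") = ""
    · rw [pvSkipBlank, dif_pos h, if_pos hb]
      have ih := pvSkipBlank_spec lines (j + 1)
      exact ⟨by omega, ih.2⟩
    · rw [pvSkipBlank, dif_pos h, if_neg hb]
      exact ⟨le_refl _, fun _ => hb⟩
  · rw [pvSkipBlank, dif_neg h]
    exact ⟨le_refl _, fun hl => absurd hl h⟩
termination_by lines.length - j
decreasing_by omega

-- a break branch of A's inner loop fires at a non-blank non-row line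
lemma pvScanA_break_core (lines : List String) (k : Nat) (block : List String)
    (h : k < lines.length) (hs : PySem.Str.strip (lines.getD k "") ≠ "")
    (hR : pvIsRow (lines.getD k "") = false) :
    pvScanA lines k block = block := by
  rw [pvScanA, dif_pos h]
  simp only []
  rw [if_neg hs]
  by_cases h1 : (PySem.Str.startswith (PySem.Str.strip (lines.getD k "")) "ATOMIC_POSITIONS" ||
      PySem.Str.startswith (PySem.Str.strip (lines.getD k "")) "K_POINTS") = true
  · rw [if_pos h1]
  · rw [if_neg h1]
    by_cases h2 : (PySem.Str.startswith (PySem.Str.strip (lines.getD k "")) "&" ||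
        PySem.Str.startswith (PySem.Str.strip (lines.getD k "")) "/") = true
    · rw [if_pos h2]
    · rw [if_neg h2]
      by_cases h3 : (PySem.Str.split₀ (PySem.Str.strip (lines.getD k ""))).length < 3
      · rw [if_pos h3]
      · exfalso
        rw [Bool.not_eq_true, Bool.or_eq_false_iff] at h1 h2
        rw [pvIsRow_intro (lines.getD k "") hs h1.1 h1.2 h2.1 h2.2 (by omega)] at hR
        simp at hR

-- with a non-empty block, any non-row line (blank or not) breaks A's inner loop
lemma pvScanA_break (lines : List String) (k : Nat) (block : List String)
    (hb : block ≠ []) (hR : pvIsRow (lines.getD k "") = false) :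
    pvScanA lines k block = block := by
  by_cases h : k < lines.length
  · by_cases hs : PySem.Str.strip (lines.getD k "") = ""
    · rw [pvScanA, dif_pos h]
      simp only []
      rw [if_pos hs, if_pos hb]
    · exact pvScanA_break_core lines k block h hs hR
  · rw [pvScanA, dif_neg h]

-- at a row line, A's inner loop appends and either stops at 3 or continues
lemma pvScanA_row (lines : List String) (k : Nat) (block : List String)
    (hR : pvIsRow (lines.getD k "") = true) :
    pvScanA lines k block =
      if 3 ≤ (block ++ [pyRstripNl (lines.getD k "")]).length then
        block ++ [pyRstripNl (lines.getD k "")]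
      else pvScanA lines (k + 1) (block ++ [pyRstripNl (lines.getD k "")]) := by
  have h : k < lines.length := pvIsRow_lt lines k hR
  obtain ⟨hs, h1, h2, h3, h4, h5⟩ := pvIsRow_elim _ hR
  rw [pvScanA, dif_pos h]
  simp only []
  rw [if_neg hs, if_neg (by rw [h1, h2]; decide), if_neg (by rw [h3, h4]; decide),
    if_neg (by omega)]

-- A's scan with empty block skips leading blanks, exactly like pvSkipBlank
lemma pvScanA_skip (lines : List String) (j : Nat) :
    pvScanA lines j [] = pvScanA lines (pvSkipBlank lines j) [] := by
  by_cases h : j < lines.length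
  · by_cases hb : PySem.Str.strip (lines.getD j "") = ""
    · have e1 : pvScanA lines j ([] : List String) = pvScanA lines (j + 1) [] := by
        rw [pvScanA, dif_pos h]
        simp only []
        rw [if_pos hb, if_neg (by simp)]
      have e2 : pvSkipBlank lines j = pvSkipBlank lines (j + 1) := by
        rw [pvSkipBlank, dif_pos h, if_pos hb]
      rw [e1, e2]
      exact pvScanA_skip lines (j + 1)
    · rw [pvSkipBlank, dif_pos h, if_neg hb]
  · rw [pvSkipBlank, dif_neg h]
termination_by lines.length - j
decreasing_by omega

-- characterization of A's scan starting at a non-blank position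
lemma pvScanA_char (lines : List String) (k : Nat)
    (hk : k < lines.length → PySem.Str.strip (lines.getD k "") ≠ "") :
    pvScanA lines k [] =
      if pvIsRow (lines.getD k "") = false then []
      else if pvIsRow (lines.getD (k + 1) "") = false then [pyRstripNl (lines.getD k "")]
      else if pvIsRow (lines.getD (k + 2) "") = false then
        [pyRstripNl (lines.getD k ""), pyRstripNl (lines.getD (k + 1) "")]
      else
        [pyRstripNl (lines.getD k ""), pyRstripNl (lines.getD (k + 1) ""),
         pyRstripNl (lines.getD (k + 2) "")] := by
  cases hR0 : pvIsRow (lines.getD k "") with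
  | false =>
    rw [if_pos rfl]
    by_cases h : k < lines.length
    · exact pvScanA_break_core lines k [] h (hk h) hR0
    · rw [pvScanA, dif_neg h]
  | true =>
    rw [if_neg (by simp), pvScanA_row lines k [] hR0, if_neg (by simp)]
    simp only [List.nil_append]
    cases hR1 : pvIsRow (lines.getD (k + 1) "") with
    | false =>
      rw [if_pos rfl]
      exact pvScanA_break lines (k + 1) _ (by simp) hR1
    | true =>
      rw [if_neg (by simp), pvScanA_row lines (k + 1) _ hR1, if_neg (by simp)]
      simp only [List.cons_append, List.nil_append]
      have e2 : k + 1 + 1 = k + 2 := by omega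
      rw [e2]
      cases hR2 : pvIsRow (lines.getD (k + 2) "") with
      | false =>
        rw [if_pos rfl]
        exact pvScanA_break lines (k + 2) _ (by simp) hR2
      | true =>
        rw [if_neg (by simp), pvScanA_row lines (k + 2) _ hR2, if_pos (by simp)]
        simp

-- the fold body of A, over a Nat index
def pvGA (lines : List String) (acc : Option String × Option (List String)) (i : Nat) :
    Option String × Option (List String) :=
  if !(PySem.Str.startswith (PySem.Str.strip (lines.getD i "")) "CELL_PARAMETERS") then acc
  else
    let header := pyRstripNl (lines.getD i "")
    let block := pvScanA lines (i + 1) []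
    if block.length = 3 then (some header, some block) else acc

-- one step of A's fold agrees with one step of B's reverse recursion
lemma pvGA_eq_step (lines : List String) (acc : Option String × Option (List String)) (i : Nat) :
    pvGA lines acc i =
      if PySem.Str.startswith (PySem.Str.strip (lines.getD i "")) "CELL_PARAMETERS" then
        if pvSkipBlank lines (i + 1) + 3 ≤ lines.length &&
            (List.range' (pvSkipBlank lines (i + 1)) 3).all (fun j => pvIsRow (lines.getD j "")) then
          (some (pyRstripNl (lines.getD i "")),
           some ((List.range' (pvSkipBlank lines (i + 1)) 3).map (fun j => pyRstripNl (lines.getD j ""))))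
        else acc
      else acc := by
  by_cases hc : PySem.Str.startswith (PySem.Str.strip (lines.getD i "")) "CELL_PARAMETERS" = true
  · unfold pvGA
    rw [if_pos hc, if_neg (by rw [hc]; decide)]
    simp only []
    rw [pvScanA_skip lines (i + 1),
      pvScanA_char lines (pvSkipBlank lines (i + 1)) (pvSkipBlank_spec lines (i + 1)).2]
    have hr : List.range' (pvSkipBlank lines (i + 1)) 3 =
        [pvSkipBlank lines (i + 1), pvSkipBlank lines (i + 1) + 1, pvSkipBlank lines (i + 1) + 2] := by
      norm_num [List.range'_succ]
    rw [hr]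
    simp only [List.all_cons, List.all_nil, List.map_cons, List.map_nil, Bool.and_true]
    cases hR0 : pvIsRow (lines.getD (pvSkipBlank lines (i + 1)) "") with
    | false => simp
    | true =>
      cases hR1 : pvIsRow (lines.getD (pvSkipBlank lines (i + 1) + 1) "") with
      | false => simp
      | true =>
        cases hR2 : pvIsRow (lines.getD (pvSkipBlank lines (i + 1) + 2) "") with
        | false => simp
        | true =>
          have hlt := pvIsRow_lt lines (pvSkipBlank lines (i + 1) + 2) hR2
          simp [show pvSkipBlank lines (i + 1) + 3 ≤ lines.length from by omega]
  · have hc' : PySem.Str.startswith (PySem.Str.strip (lines.getD i "")) "CELL_PARAMETERS" = false := by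
      revert hc
      cases PySem.Str.startswith (PySem.Str.strip (lines.getD i "")) "CELL_PARAMETERS" <;> simp
    unfold pvGA
    rw [hc']
    simp

lemma foldA_eq_findB (lines : List String) (m : Nat) :
    (List.range m).foldl (pvGA lines) (none, none) = pvFindB lines m := by
  induction m with
  | zero => rfl
  | succ m ih =>
    rw [List.range_succ, List.foldl_append, List.foldl_cons, List.foldl_nil, ih,
      pvGA_eq_step, pvFindB]

lemma enumerate_fold (lines : List String) :
    parse_last_cell_parameters lines = (List.range lines.length).foldl (pvGA lines) (none, none) := by
  unfold parse_last_cell_parameters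
  rw [PySem.List.enumerate_eq_map_pyRange (d := ""), List.foldl_map, PySem.List.pyRange_one,
    List.foldl_map]
  simp only [PySem.List.pyGetD_natCast, zero_add, Int.toNat_natCast, Int.sub_zero]
  rfl

-- ===== VERDICT (by name: the statement is the Claim_ definition above) =====
theorem parse_last_cell_parameters_spec : Claim_equal_parse_last_cell_parameters := by
  intro lines _
  unfold Spec_parse_last_cell_parameters parse_last_cell_parameters_alt
  rw [enumerate_fold, foldA_eq_findB]
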